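-- pv_equiv track=rewrite | github.com/ovanov/Kollokationsprofile-von-DFCP | kollokationsprofile_daten/10Words/dass/kollokation_mehrere_pr.py | count_collocations
-- ===== SOURCE A (Python) =====
-- from typing import Dict, List
--
-- def count_collocations(preprocessed_list: List) -> Dict:
--     """
--     This function reads a list and counts the 10 most occuring collocators in the 10 position before 'dass'
--     The dictionary takes the word as a key and the occurances as a enumeration as values
--     """
--     word_count_dict = {}
--
--     for listed_values in preprocessed_list: # access single list
--         for value in listed_values: # access single value
--             if value not in word_count_dict.keys(): # if no value is in the dictionary
--                 word_count_dict[value] = [ # create list of 10 zeros, in order to represent the 10 positions before dass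
--                     0, 0, 0, 0, 0, 0, 0, 0, 0, 0
--                 ]
--                 word_count_dict[value][listed_values.index(value)] += 1 # increment at the correct number
--             else:
--                 word_count_dict[value][listed_values.index(value)] += 1
--
--     return word_count_dict
-- ===== SOURCE B (Python) =====
-- def count_collocations(preprocessed_list):
--     """Aggregate-then-scatter: per inner list build a {value: count} dict in one
--     pass, then add each value's total count once at its first-occurrence position."""
--     word_count_dict = {}
--     for listed_values in preprocessed_list:
--         counts = {}
--         for value in listed_values:
--             counts[value] = counts.get(value, 0) + 1
--         for value, c in counts.items():
--             if value not in word_count_dict: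
--                 word_count_dict[value] = [0] * 10
--             word_count_dict[value][listed_values.index(value)] += c
--     return word_count_dict
-- ===== Notes on version B (the rewrite author's own statement) =====
-- stated objective: alternative
-- what changed: A increments a position counter once per element (calling listed_values.index for every element); B first aggregates each inner list into a {value: count} dict in one pass and then scatters each total once at the value's first-occurrence position, so .index runs once per distinct value instead of once per element.
import Mathlib
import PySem

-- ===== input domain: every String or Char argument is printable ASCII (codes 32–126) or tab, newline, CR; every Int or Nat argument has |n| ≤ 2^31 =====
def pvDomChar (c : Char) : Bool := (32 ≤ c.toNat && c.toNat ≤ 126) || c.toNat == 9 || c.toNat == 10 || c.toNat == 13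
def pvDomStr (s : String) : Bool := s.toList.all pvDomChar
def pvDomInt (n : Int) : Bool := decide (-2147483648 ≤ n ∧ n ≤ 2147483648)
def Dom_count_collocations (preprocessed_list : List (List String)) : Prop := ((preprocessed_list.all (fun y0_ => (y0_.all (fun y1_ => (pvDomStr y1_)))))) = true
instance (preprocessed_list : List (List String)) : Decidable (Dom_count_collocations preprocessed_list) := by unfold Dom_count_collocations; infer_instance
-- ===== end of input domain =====

-- B replaces A's per-element increment (one list.index call and one += 1 per element) by an
-- aggregate-then-scatter pass: count each inner list once, then add each total once at the
-- first-occurrence position.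

-- ===== PORT A =====
-- step for one element `value` of `listed_values`; `row[i] += 1` is ported as
-- row.set i (row.getD i 0 + 1): exact under Pre_ (then i < 10 = row length); Python raises
-- IndexError for i ≥ 10, and those inputs are excluded by Pre_count_collocations.
def ccStepA (listed_values : List String) (d : PySem.Dict String (List Int)) (value : String) :
    PySem.Dict String (List Int) :=
  let i := (PySem.List.index? listed_values value).getD 0   -- listed_values.index(value); value ∈ listed_values, so never none
  if d.contains value = false then
    let d' := d.insert value [0, 0, 0, 0, 0, 0, 0, 0, 0, 0]
    d'.modify value [0, 0, 0, 0, 0, 0, 0, 0, 0, 0] (fun row => row.set i (row.getD i 0 + 1))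
  else
    d.modify value [0, 0, 0, 0, 0, 0, 0, 0, 0, 0] (fun row => row.set i (row.getD i 0 + 1))

def count_collocations (preprocessed_list : List (List String)) : List (String × List Int) :=
  (preprocessed_list.foldl
    (fun d listed_values => listed_values.foldl (ccStepA listed_values) d)
    PySem.Dict.empty).items

-- ===== PORT B =====
-- scatter step for one (value, c) pair of the per-list counter (same porting of `+= c` as in A)
def ccStepB (listed_values : List String) (d : PySem.Dict String (List Int)) (p : String × Int) :
    PySem.Dict String (List Int) :=
  let d' := if d.contains p.1 = false then d.insert p.1 (List.replicate 10 (0 : Int)) else d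
  let i := (PySem.List.index? listed_values p.1).getD 0
  d'.modify p.1 (List.replicate 10 (0 : Int)) (fun row => row.set i (row.getD i 0 + p.2))

def count_collocations_alt (preprocessed_list : List (List String)) : List (String × List Int) :=
  (preprocessed_list.foldl
    (fun d listed_values =>
      let counts := listed_values.foldl (fun c v => c.insert v (c.getD v 0 + 1)) PySem.Dict.empty
      counts.items.foldl (ccStepB listed_values) d)
    PySem.Dict.empty).items

-- ===== PRECONDITION & SPEC =====
-- Pre_ excludes exactly the inputs on which A raises IndexError: an inner list containing a
-- word whose first occurrence lies at position ≥ 10 (the count rows have only 10 slots).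
def Pre_count_collocations (preprocessed_list : List (List String)) : Prop :=
  ∀ lv ∈ preprocessed_list, ∀ v ∈ lv, ((PySem.List.index? lv v).getD 0) < 10
instance (preprocessed_list : List (List String)) : Decidable (Pre_count_collocations preprocessed_list) := by unfold Pre_count_collocations; infer_instance

def pvWitness_count_collocations : List (List String) := [["a", "b", "a"], ["c"]]

def Spec_count_collocations (preprocessed_list : List (List String)) (out : List (String × List Int)) : Prop := out = count_collocations_alt preprocessed_list
instance (preprocessed_list : List (List String)) (out : List (String × List Int)) : Decidable (Spec_count_collocations preprocessed_list out) := by unfold Spec_count_collocations; infer_instance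

-- ===== CLAIM (what is proved, stated in full; the proofs are below) =====
def Claim_equal_count_collocations : Prop := ∀ (preprocessed_list : List (List String)), Dom_count_collocations preprocessed_list → Pre_count_collocations preprocessed_list → Spec_count_collocations preprocessed_list (count_collocations preprocessed_list)

-- ===== LEMMAS AND PROOFS =====

lemma ccInsertComm {κ ν : Type} [BEq κ] [LawfulBEq κ] (d : PySem.Dict κ ν) (v w : κ) (a b : ν)
    (hv : d.contains v = true) (hne : w ≠ v) :
    (d.insert w b).insert v a = (d.insert v a).insert w b := by
  apply PySem.Dict.ext
  by_cases hw : d.contains w = true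
  · rw [PySem.Dict.items_insert, PySem.Dict.items_insert, PySem.Dict.items_insert, PySem.Dict.items_insert]
    simp [PySem.Dict.contains_insert, hv, hw, List.map_map]
    intro x y _
    by_cases h1 : x = w
    · simp [h1, beq_eq_false_iff_ne.mpr hne]
    · by_cases h2 : x = v
      · simp [h2, beq_eq_false_iff_ne.mpr (Ne.symm hne)]
      · simp [beq_eq_false_iff_ne.mpr h1, beq_eq_false_iff_ne.mpr h2]
  · simp at hw
    rw [PySem.Dict.items_insert, PySem.Dict.items_insert, PySem.Dict.items_insert, PySem.Dict.items_insert]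
    simp [PySem.Dict.contains_insert, hv, hw, hne]

lemma ccBumpBump (row : List Int) (i : Nat) (a b : Int) :
    ((row.set i (row.getD i 0 + a)).set i ((row.set i (row.getD i 0 + a)).getD i 0 + b))
      = row.set i (row.getD i 0 + (a + b)) := by
  by_cases h : i < row.length
  · rw [List.set_set]
    simp [List.getD_eq_getElem?_getD, h]
    ring_nf
  · simp [List.set_eq_of_length_le (le_of_not_gt h)]

lemma ccContains_stepB (lv : List String) (d : PySem.Dict String (List Int)) (p : String × Int)
    (v : String) (hv : d.contains v = true) : (ccStepB lv d p).contains v = true := by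
  simp only [ccStepB, PySem.Dict.modify, PySem.Dict.contains_insert]
  split_ifs <;> simp [PySem.Dict.contains_insert, hv]

lemma ccContains_stepB_self (lv : List String) (d : PySem.Dict String (List Int)) (c : Int)
    (v : String) : (ccStepB lv d (v, c)).contains v = true := by
  simp only [ccStepB, PySem.Dict.modify, PySem.Dict.contains_insert]
  simp

lemma ccStepB_of_contains (lv : List String) (d : PySem.Dict String (List Int)) (k : String)
    (c : Int) (h : d.contains k = true) :
    ccStepB lv d (k, c) = d.insert k
      (let i := (PySem.List.index? lv k).getD 0
       (d.getD k (List.replicate 10 0)).set i ((d.getD k (List.replicate 10 0)).getD i 0 + c)) := by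
  simp [ccStepB, PySem.Dict.modify, h]

lemma ccStepB_of_not_contains (lv : List String) (d : PySem.Dict String (List Int)) (k : String)
    (c : Int) (h : d.contains k = false) :
    ccStepB lv d (k, c) = d.insert k
      (let i := (PySem.List.index? lv k).getD 0
       (List.replicate 10 (0:Int)).set i ((List.replicate 10 (0:Int)).getD i 0 + c)) := by
  simp [ccStepB, PySem.Dict.modify, h, PySem.Dict.getD_insert_self, PySem.Dict.insert_insert_self]

lemma ccStepB_merge (lv : List String) (d : PySem.Dict String (List Int)) (v : String) (a b : Int) :
    ccStepB lv (ccStepB lv d (v, a)) (v, b) = ccStepB lv d (v, a + b) := by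
  simp only [ccStepB, PySem.Dict.modify]
  rw [if_neg (by simp)]
  by_cases hc : d.contains v = true
  · rw [if_neg (by simp [hc])]
    simp only [PySem.Dict.getD_insert_self, PySem.Dict.insert_insert_self]
    rw [ccBumpBump]
  · simp at hc
    rw [if_pos hc]
    simp only [PySem.Dict.getD_insert_self, PySem.Dict.insert_insert_self]
    rw [ccBumpBump]

lemma ccStepB_comm (lv : List String) (d : PySem.Dict String (List Int)) (v w : String)
    (b c : Int) (hv : d.contains v = true) (hne : w ≠ v) :
    ccStepB lv (ccStepB lv d (w, b)) (v, c) = ccStepB lv (ccStepB lv d (v, c)) (w, b) := by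
  rw [ccStepB_of_contains lv d v c hv]
  by_cases hw : d.contains w = true
  · rw [ccStepB_of_contains lv d w b hw]
    rw [ccStepB_of_contains lv _ v c (by simp [PySem.Dict.contains_insert, hv])]
    rw [ccStepB_of_contains lv _ w b (by simp [PySem.Dict.contains_insert, hw])]
    rw [PySem.Dict.getD_insert_of_ne _ _ _ hne, PySem.Dict.getD_insert_of_ne _ _ _ (Ne.symm hne)]
    exact ccInsertComm d v w _ _ hv hne
  · simp at hw
    rw [ccStepB_of_not_contains lv d w b hw]
    rw [ccStepB_of_contains lv _ v c (by simp [PySem.Dict.contains_insert, hv])]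
    rw [ccStepB_of_not_contains lv _ w b (by simp [PySem.Dict.contains_insert, hw, hne])]
    rw [PySem.Dict.getD_insert_of_ne _ _ _ (Ne.symm hne)]
    exact ccInsertComm d v w _ _ hv hne

lemma ccStepB_pull (lv : List String) (v : String) (c : Int) :
    ∀ (P : List (String × Int)) (d : PySem.Dict String (List Int)),
      (∀ p ∈ P, p.1 ≠ v) → d.contains v = true →
      ccStepB lv (P.foldl (ccStepB lv) d) (v, c) = P.foldl (ccStepB lv) (ccStepB lv d (v, c)) := by
  intro P
  induction P with
  | nil => intro d _ _; rfl
  | cons p P ih =>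
    intro d hkeys hv
    have hp : p.1 ≠ v := hkeys p (by simp)
    have h2 : (ccStepB lv d p).contains v = true := ccContains_stepB lv d p v hv
    simp only [List.foldl_cons]
    rw [ih (ccStepB lv d p) (fun q hq => hkeys q (by simp [hq])) h2]
    have : ccStepB lv (ccStepB lv d p) (v, c) = ccStepB lv (ccStepB lv d (v, c)) p := by
      have := ccStepB_comm lv d v p.1 p.2 c hv hp
      simpa using this
    rw [this]

lemma ccStepA_eq (lv : List String) (d : PySem.Dict String (List Int)) (v : String) :
    ccStepA lv d v = ccStepB lv d (v, 1) := by
  have hz : List.replicate 10 (0:Int) = [0,0,0,0,0,0,0,0,0,0] := by decide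
  simp only [ccStepA, ccStepB, hz]
  by_cases h : d.contains v = false <;> simp [h]

lemma ccGroup (lv : List String) : ∀ (xs : List String) (d : PySem.Dict String (List Int)),
    xs.foldl (ccStepA lv) d
      = ((PySem.Set.ofList xs).map (fun k => (k, (xs.count k : Int)))).foldl (ccStepB lv) d := by
  intro xs
  induction xs with
  | nil => intro d; rfl
  | cons v xs ih =>
    intro d
    rw [List.foldl_cons, ccStepA_eq, ih, PySem.Set.ofList_cons]
    by_cases hmem : v ∈ xs
    · have hvin : v ∈ PySem.Set.ofList xs := (PySem.Set.mem_ofList xs v).mpr hmem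
      obtain ⟨pre, suf, hsplit⟩ := List.append_of_mem hvin
      have hnd : (PySem.Set.ofList xs).Nodup := PySem.Set.nodup_ofList xs
      rw [hsplit] at hnd
      rw [List.nodup_middle, List.nodup_cons] at hnd
      have hvpre : v ∉ pre := fun h => hnd.1 (List.mem_append.mpr (Or.inl h))
      have hvsuf : v ∉ suf := fun h => hnd.1 (List.mem_append.mpr (Or.inr h))
      have hdis : (PySem.Set.ofList xs).discard v = pre ++ suf := by
        rw [hsplit]
        simp only [PySem.Set.discard, List.filter_append, List.filter_cons]
        rw [List.filter_eq_self.mpr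
              (fun a ha => by simp [beq_eq_false_iff_ne.mpr (show a ≠ v from fun h => hvpre (h ▸ ha))]),
            List.filter_eq_self.mpr
              (fun a ha => by simp [beq_eq_false_iff_ne.mpr (show a ≠ v from fun h => hvsuf (h ▸ ha))])]
        simp
      rw [hdis, hsplit]
      -- rewrite the counts over (v :: xs) into counts over xs on pre/suf (keys ≠ v)
      have hg : ∀ (l : List String), v ∉ l →
          l.map (fun k => (k, ((v :: xs).count k : Int))) = l.map (fun k => (k, (xs.count k : Int))) := by
        intro l hvl
        apply List.map_congr_left
        intro k hk
        have hkv : k ≠ v := fun h => hvl (h ▸ hk)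
        simp [List.count_cons, beq_eq_false_iff_ne.mpr (Ne.symm hkv)]
      simp only [List.map_append, List.map_cons, List.foldl_append, List.foldl_cons]
      rw [hg pre hvpre, hg suf hvsuf]
      have hcnt : (((v :: xs).count v : Nat) : Int) = (xs.count v : Int) + 1 := by
        rw [List.count_cons_self]; push_cast; ring
      rw [hcnt]
      have hkeys : ∀ p ∈ pre.map (fun k => (k, (xs.count k : Int))), p.1 ≠ v := by
        intro p hp
        obtain ⟨k, hk, rfl⟩ := List.mem_map.mp hp
        exact fun h => hvpre (h ▸ hk)
      have hcv : (ccStepB lv d (v, 1)).contains v = true := ccContains_stepB_self lv d 1 v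
      rw [ccStepB_pull lv v (xs.count v : Int) (pre.map (fun k => (k, (xs.count k : Int)))) _ hkeys hcv]
      rw [ccStepB_merge]
      rw [add_comm (1 : Int)]
    · have hvin : v ∉ PySem.Set.ofList xs := fun h => hmem ((PySem.Set.mem_ofList xs v).mp h)
      have hdis : (PySem.Set.ofList xs).discard v = PySem.Set.ofList xs := by
        simp only [PySem.Set.discard]
        exact List.filter_eq_self.mpr
          (fun a ha => by simp [beq_eq_false_iff_ne.mpr (show a ≠ v from fun h => hvin (h ▸ ha))])
      rw [hdis]
      simp only [List.map_cons, List.foldl_cons]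
      have hcnt : (((v :: xs).count v : Nat) : Int) = 1 := by
        rw [List.count_cons_self, List.count_eq_zero.mpr hmem]; norm_num
      rw [hcnt]
      congr 1
      apply List.map_congr_left
      intro k hk
      have hkv : k ≠ v := fun h => hvin (h ▸ hk)
      simp [List.count_cons, beq_eq_false_iff_ne.mpr (Ne.symm hkv)]

-- ===== VERDICT (by name: the statement is the Claim_ definition above) =====
theorem count_collocations_spec : Claim_equal_count_collocations := by
  intro pl _ _
  unfold Spec_count_collocations count_collocations count_collocations_alt
  congr 2
  funext d lv
  show lv.foldl (ccStepA lv) d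
      = (lv.foldl (fun c v => c.insert v (c.getD v 0 + 1)) PySem.Dict.empty).items.foldl (ccStepB lv) d
  rw [PySem.Dict.foldl_insert_getD_add_one_eq_counter, PySem.Dict.items_counter]
  exact ccGroup lv lv d
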